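-- pv_equiv track=rewrite | github.com/isayaksh/Algorithm | BaekJoon/20955.py | solution
-- ===== SOURCE A (Python) =====
-- def solution(N, M, edges):
--
--     answer = 0
--
--     # find & union
--     parent = [i for i in range(N+1)]
--     def find(x):
--         if parent[x] != x:
--             parent[x] = find(parent[x])
--         return parent[x]
--     def union(x, y):
--         x, y = find(x), find(y)
--         parent[max(x, y)] = min(x, y)
--
--     for u, v in edges:
--         findU, findV = find(u), find(v)
--         # 사이클이 존재할 경우
--         if findU == findV: answer += 1
--         union(findU, findV)
--
--     return answer + sum([1 if parent[i] == i else 0 for i in range(1, N+1)]) - 1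
-- ===== SOURCE B (Python) =====
-- def solution(N, M, edges):
--     parent = list(range(N + 1))
--
--     def find(x):
--         while parent[x] != x:
--             x = parent[x]
--         return x
--
--     for u, v in edges:
--         ru, rv = find(u), find(v)
--         if ru != rv:
--             parent[max(ru, rv)] = min(ru, rv)
--
--     C = sum(1 for i in range(1, N + 1) if parent[i] == i)
--     return len(edges) - N + 2 * C - 1
-- ===== Notes on version B (the rewrite author's own statement) =====
-- stated objective: simpler
-- what changed: B drops A's recursive path-compressing find, the per-edge cycle counter and the second find inside union, replacing them with a plain iterative root walk, a single conditional link per edge, and the closed formula len(edges) - N + 2*C - 1 over the final root count C.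
-- outside the precondition, e.g. on solution(-5, 0, []): A returns -1, B returns 4
import Mathlib
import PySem

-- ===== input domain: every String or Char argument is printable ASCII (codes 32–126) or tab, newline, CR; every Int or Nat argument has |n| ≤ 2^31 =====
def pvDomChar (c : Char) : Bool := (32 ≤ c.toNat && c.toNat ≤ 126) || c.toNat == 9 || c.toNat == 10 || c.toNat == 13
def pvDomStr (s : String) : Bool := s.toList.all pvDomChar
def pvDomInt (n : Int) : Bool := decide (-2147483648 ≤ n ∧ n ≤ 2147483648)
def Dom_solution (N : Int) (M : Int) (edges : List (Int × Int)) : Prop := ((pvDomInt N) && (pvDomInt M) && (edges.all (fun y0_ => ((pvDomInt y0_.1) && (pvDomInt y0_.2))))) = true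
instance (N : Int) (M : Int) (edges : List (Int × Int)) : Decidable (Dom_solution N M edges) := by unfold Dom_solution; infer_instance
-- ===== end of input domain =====

-- B replaces A's recursive path-compressing find, per-edge cycle counter and second find inside
-- union by a plain iterative root walk, one conditional link per edge and the closed formula
-- len(edges) - N + 2*C - 1 over the final root count C (objective: simpler).

-- ===== PORT A =====
-- Python list read/write parent[x] with negative-index wraparound, ported by hand over
-- Array for O(1) access (exact for -len <= x < len; out-of-range indices raise IndexError
-- in Python and are excluded by Pre_)
def pvAGet (p : Array Int) (x : Int) : Int :=
  if 0 <= x then p.getD x.toNat 0 else p.getD (x + p.size).toNat 0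

def pvASet (p : Array Int) (x : Int) (v : Int) : Array Int :=
  if 0 <= x then p.setIfInBounds x.toNat v else p.setIfInBounds (x + p.size).toNat v

-- recursive find with path compression; the fuel (= len(parent)) only bounds the recursion depth
-- of Python's recursive find, whose parent chain is strictly decreasing
def pvFindA : Nat → Array Int → Int → Array Int × Int
  | 0, p, x => (p, pvAGet p x)
  | fuel+1, p, x =>
    if pvAGet p x ≠ x then
      let pr := pvFindA fuel p (pvAGet p x)
      let p2 := pvASet pr.1 x pr.2
      (p2, pvAGet p2 x)
    else (p, pvAGet p x)

def pvUnionA (fuel : Nat) (p : Array Int) (x y : Int) : Array Int :=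
  let fx := pvFindA fuel p x
  let fy := pvFindA fuel fx.1 y
  pvASet fy.1 (max fx.2 fy.2) (min fx.2 fy.2)

def solution (N : Int) (M : Int) (edges : List (Int × Int)) : Int :=
  let parent := (PySem.List.pyRange 0 (N+1) 1).toArray
  let fuel := parent.size
  let st := edges.foldl (fun (st : Array Int × Int) uv =>
      let f1 := pvFindA fuel st.1 uv.1
      let f2 := pvFindA fuel f1.1 uv.2
      let answer := if f1.2 = f2.2 then st.2 + 1 else st.2
      (pvUnionA fuel f2.1 f1.2 f2.2, answer)) (parent, 0)
  st.2 + ((PySem.List.pyRange 1 (N+1) 1).map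
      (fun i => if pvAGet st.1 i = i then (1:Int) else 0)).foldl (· + ·) 0 - 1

-- ===== PORT B =====
-- iterative root walk, no mutation; the fuel (= len(parent)) only bounds the walk
def pvFindB : Nat → Array Int → Int → Int
  | 0, _, x => x
  | fuel+1, p, x =>
    if pvAGet p x ≠ x then pvFindB fuel p (pvAGet p x) else x

def solution_alt (N : Int) (M : Int) (edges : List (Int × Int)) : Int :=
  let parent := (PySem.List.pyRange 0 (N+1) 1).toArray
  let p := edges.foldl (fun (p : Array Int) uv =>
      let ru := pvFindB p.size p uv.1
      let rv := pvFindB p.size p uv.2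
      if ru ≠ rv then pvASet p (max ru rv) (min ru rv) else p) parent
  let C := ((PySem.List.pyRange 1 (N+1) 1).map
      (fun i => if pvAGet p i = i then (1:Int) else 0)).foldl (· + ·) 0
  (edges.length : Int) - N + 2*C - 1

-- ===== PRECONDITION & SPEC =====
-- Pre_ excludes negative N (degenerate: A's parent table is empty/truncated there and its return
-- value on N<0, edges=[] is an artefact of summing an empty range) and vertices outside
-- [-(N+1), N], on which A raises IndexError; in-range negative vertices (Python's negative-index
-- wraparound) are kept inside Pre_ and proved equal.
def Pre_solution (N : Int) (M : Int) (edges : List (Int × Int)) : Prop :=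
  0 ≤ N ∧ ∀ uv ∈ edges, -(N+1) ≤ uv.1 ∧ uv.1 ≤ N ∧ -(N+1) ≤ uv.2 ∧ uv.2 ≤ N
instance (N : Int) (M : Int) (edges : List (Int × Int)) : Decidable (Pre_solution N M edges) := by
  unfold Pre_solution; infer_instance

def pvWitness_solution : Int × Int × (List (Int × Int)) := (3, 3, [(1, 2), (-1, 2), (2, 3)])

def Spec_solution (N : Int) (M : Int) (edges : List (Int × Int)) (out : Int) : Prop := out = solution_alt N M edges
instance (N : Int) (M : Int) (edges : List (Int × Int)) (out : Int) : Decidable (Spec_solution N M edges out) := by unfold Spec_solution; infer_instance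

-- ===== CLAIM (what is proved, stated in full; the proofs are below) =====
def Claim_equal_solution : Prop := ∀ (N : Int) (M : Int) (edges : List (Int × Int)), Dom_solution N M edges → Pre_solution N M edges → Spec_solution N M edges (solution N M edges)

-- ===== LEMMAS AND PROOFS =====

-- basic facts about pvAGet/pvASet and Array.setIfInBounds
theorem pvAGet_natCast (p : Array Int) (n : Nat) : pvAGet p (n : Int) = p.getD n 0 := by
  simp [pvAGet]

theorem pvAGet_of_nonneg (p : Array Int) (x : Int) (h : 0 ≤ x) :
    pvAGet p x = p.getD x.toNat 0 := by
  rw [pvAGet, if_pos h]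

theorem pvAGet_neg (p : Array Int) (x : Int) (h2 : x < 0) :
    pvAGet p x = p.getD (x + p.size).toNat 0 := by
  rw [pvAGet, if_neg (by omega)]

theorem pvASet_natCast (p : Array Int) (n : Nat) (v : Int) :
    pvASet p (n : Int) v = p.setIfInBounds n v := by
  simp [pvASet]

theorem pvASet_neg (p : Array Int) (x v : Int) (h2 : x < 0) :
    pvASet p x v = p.setIfInBounds (x + p.size).toNat v := by
  rw [pvASet, if_neg (by omega)]

theorem pvGetD_toArray (l : List Int) (n : Nat) (d : Int) :
    l.toArray.getD n d = l.getD n d := by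
  simp [Array.getD_eq_getD_getElem?, List.getD_eq_getElem?_getD]

theorem pvGetD_set (p : Array Int) (a i : Nat) (v : Int) (ha : a < p.size) :
    (p.setIfInBounds a v).getD i 0 = if i = a then v else p.getD i 0 := by
  rw [Array.getD_eq_getD_getElem?, Array.getD_eq_getD_getElem?, Array.getElem?_setIfInBounds]
  by_cases h : i = a
  · subst h
    rw [if_pos rfl, if_pos rfl, if_pos ha, Option.getD_some]
  · rw [if_neg h, if_neg (fun hh => h hh.symm)]

def pvGood (p : Array Int) : Prop := ∀ i, i < p.size → 0 ≤ p.getD i 0 ∧ p.getD i 0 ≤ (i : Int)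

def pvRootN : Array Int → Nat → Nat → Nat
  | _, 0, x => x
  | p, f+1, x => if (p.getD x 0).toNat = x then x else pvRootN p f (p.getD x 0).toNat

def pvRoot (p : Array Int) (x : Nat) : Nat := pvRootN p (x+1) x

theorem pvRootN_stable (p : Array Int) (hG : pvGood p) :
    ∀ x f, x < p.size → x < f → pvRootN p f x = pvRoot p x := by
  intro x
  induction x using Nat.strong_induction_on with
  | _ x ih =>
    intro f hx hf
    obtain ⟨g, rfl⟩ : ∃ g, f = g + 1 := ⟨f - 1, by omega⟩
    unfold pvRoot
    by_cases h : (p.getD x 0).toNat = x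
    · simp only [pvRootN, if_pos h]
    · have hb := hG x hx
      have hy : (p.getD x 0).toNat < x := by omega
      simp only [pvRootN, h, if_false]
      rw [ih _ hy _ (by omega) (by omega), ih _ hy _ (by omega) (by omega)]

theorem pvRoot_fix_of (p : Array Int) (x : Nat) (h : p.getD x 0 = (x : Int)) : pvRoot p x = x := by
  have h' : (p.getD x 0).toNat = x := by rw [h]; exact Int.toNat_natCast x
  unfold pvRoot
  simp only [pvRootN, if_pos h']

theorem pvRoot_nonroot (p : Array Int) (hG : pvGood p) (x : Nat) (hx : x < p.size)
    (h : p.getD x 0 ≠ (x : Int)) : pvRoot p x = pvRoot p (p.getD x 0).toNat := by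
  have hb := hG x hx
  have hne : (p.getD x 0).toNat ≠ x := by omega
  have hy : (p.getD x 0).toNat < x := by omega
  conv_lhs => rw [pvRoot]
  simp only [pvRootN, hne, if_false]
  exact pvRootN_stable p hG _ _ (by omega) (by omega)

theorem pvRoot_le (p : Array Int) (hG : pvGood p) : ∀ x, x < p.size → pvRoot p x ≤ x := by
  intro x
  induction x using Nat.strong_induction_on with
  | _ x ih =>
    intro hx
    by_cases h : p.getD x 0 = (x : Int)
    · rw [pvRoot_fix_of p x h]
    · have hb := hG x hx
      have hy : (p.getD x 0).toNat < x := by omega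
      rw [pvRoot_nonroot p hG x hx h]
      have := ih _ hy (by omega)
      omega

theorem pvRoot_isfix (p : Array Int) (hG : pvGood p) :
    ∀ x, x < p.size → p.getD (pvRoot p x) 0 = (pvRoot p x : Int) := by
  intro x
  induction x using Nat.strong_induction_on with
  | _ x ih =>
    intro hx
    by_cases h : p.getD x 0 = (x : Int)
    · rw [pvRoot_fix_of p x h]; exact h
    · have hb := hG x hx
      have hy : (p.getD x 0).toNat < x := by omega
      rw [pvRoot_nonroot p hG x hx h]
      exact ih _ hy (by omega)

theorem pvEntry_iff_root (p : Array Int) (hG : pvGood p) (x : Nat) (hx : x < p.size) :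
    p.getD x 0 = (x : Int) ↔ pvRoot p x = x := by
  constructor
  · exact pvRoot_fix_of p x
  · intro h
    by_contra hne
    have hb := hG x hx
    have hy : (p.getD x 0).toNat < x := by omega
    have := pvRoot_nonroot p hG x hx hne
    have hle := pvRoot_le p hG (p.getD x 0).toNat (by omega)
    omega

theorem pvRoot_congr (p q : Array Int) (_hlen : p.size = q.size)
    (h : ∀ i, p.getD i 0 = q.getD i 0) : ∀ x, pvRoot p x = pvRoot q x := by
  have key : ∀ f x, pvRootN p f x = pvRootN q f x := by
    intro f
    induction f with
    | zero => intro x; rfl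
    | succ g ih => intro x; simp only [pvRootN, h x, ih]
  intro x; exact key _ x

theorem pvGood_set (p : Array Int) (hG : pvGood p) (a : Nat) (v : Int) (ha : a < p.size)
    (h0 : 0 ≤ v) (hv : v ≤ (a : Int)) : pvGood (p.setIfInBounds a v) := by
  intro i hi
  rw [Array.size_setIfInBounds] at hi
  rw [pvGetD_set p a i v ha]
  by_cases h : i = a
  · subst h; simp [h0, hv]
  · simp only [h, if_false]; exact hG i hi

theorem pvRoot_set_root (p : Array Int) (hG : pvGood p) (x : Nat) (hx : x < p.size) :
    ∀ y, y < p.size → pvRoot (p.setIfInBounds x (pvRoot p x : Int)) y = pvRoot p y := by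
  have hrle := pvRoot_le p hG x hx
  have hG' : pvGood (p.setIfInBounds x (pvRoot p x : Int)) :=
    pvGood_set p hG x _ hx (by positivity) (by exact_mod_cast hrle)
  have hlen : (p.setIfInBounds x (pvRoot p x : Int)).size = p.size := Array.size_setIfInBounds ..
  intro y
  induction y using Nat.strong_induction_on with
  | _ y ih =>
    intro hy
    by_cases hxy : y = x
    · subst hxy
      by_cases hr : pvRoot p y = y
      · have hfx : (p.setIfInBounds y (pvRoot p y : Int)).getD y 0 = (y : Int) := by
          rw [pvGetD_set p y y _ hy, if_pos rfl, hr]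
        rw [pvRoot_fix_of _ y hfx, hr]
      · have hent : (p.setIfInBounds y (pvRoot p y : Int)).getD y 0 = (pvRoot p y : Int) := by
          rw [pvGetD_set p y y _ hy, if_pos rfl]
        have hlt : pvRoot p y < y := by omega
        have hne : (p.setIfInBounds y (pvRoot p y : Int)).getD y 0 ≠ (y : Int) := by
          rw [hent]; exact_mod_cast hr
        rw [pvRoot_nonroot _ hG' y (by omega) hne]
        rw [hent]
        simp only [Int.toNat_natCast]
        rw [ih _ hlt (by omega)]
        exact pvRoot_fix_of p _ (pvRoot_isfix p hG y hy)
    · have hent : (p.setIfInBounds x (pvRoot p x : Int)).getD y 0 = p.getD y 0 := by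
        rw [pvGetD_set p x y _ hx, if_neg hxy]
      by_cases hfix : p.getD y 0 = (y : Int)
      · rw [pvRoot_fix_of _ y (by rw [hent]; exact hfix), pvRoot_fix_of p y hfix]
      · have hb := hG y hy
        have hlt : (p.getD y 0).toNat < y := by omega
        rw [pvRoot_nonroot _ hG' y (by omega) (by rw [hent]; exact hfix), hent]
        rw [pvRoot_nonroot p hG y hy hfix]
        exact ih _ hlt (by omega)

theorem pvRoot_set_link (p : Array Int) (hG : pvGood p) (a b : Nat)
    (ha : a < p.size) (hb : b < p.size) (hab : a ≤ b)
    (hra : p.getD a 0 = (a : Int)) (hrb : p.getD b 0 = (b : Int)) :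
    ∀ y, y < p.size → pvRoot (p.setIfInBounds b (a : Int)) y =
      (if pvRoot p y = b then a else pvRoot p y) := by
  have hG' : pvGood (p.setIfInBounds b (a : Int)) :=
    pvGood_set p hG b _ hb (by positivity) (by exact_mod_cast hab)
  have hlen : (p.setIfInBounds b (a : Int)).size = p.size := Array.size_setIfInBounds ..
  intro y
  induction y using Nat.strong_induction_on with
  | _ y ih =>
    intro hy
    by_cases hyb : y = b
    · subst hyb
      have hent : (p.setIfInBounds y (a : Int)).getD y 0 = (a : Int) := by
        rw [pvGetD_set p y y _ hy, if_pos rfl]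
      rw [pvRoot_fix_of p y hrb, if_pos rfl]
      by_cases hay : a = y
      · subst hay
        exact pvRoot_fix_of _ a hent
      · have hlt : a < y := by omega
        rw [pvRoot_nonroot _ hG' y (by omega) (by rw [hent]; exact_mod_cast hay)]
        rw [hent]
        simp only [Int.toNat_natCast]
        rw [ih _ hlt (by omega)]
        rw [pvRoot_fix_of p a hra]
        simp [hay]
    · have hent : (p.setIfInBounds b (a : Int)).getD y 0 = p.getD y 0 := by
        rw [pvGetD_set p b y _ hb, if_neg hyb]
      by_cases hfix : p.getD y 0 = (y : Int)
      · rw [pvRoot_fix_of _ y (by rw [hent]; exact hfix), pvRoot_fix_of p y hfix,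
          if_neg (by simpa using hyb)]
      · have hbnd := hG y hy
        have hlt : (p.getD y 0).toNat < y := by omega
        rw [pvRoot_nonroot _ hG' y (by omega) (by rw [hent]; exact hfix), hent]
        rw [pvRoot_nonroot p hG y hy hfix]
        exact ih _ hlt (by omega)

def pvNorm (L : Nat) (x : Int) : Nat := if 0 ≤ x then x.toNat else (x + L).toNat

def pvP (p p' : Array Int) : Prop :=
  p'.size = p.size ∧ pvGood p' ∧ ∀ y, y < p.size → pvRoot p' y = pvRoot p y

theorem pvFindA_fix (f : Nat) (p : Array Int) (x : Int) (h : pvAGet p x = x) :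
    pvFindA f p x = (p, x) := by
  cases f with
  | zero => simp [pvFindA, h]
  | succ g => simp [pvFindA, h]

theorem pvFindB_fix (f : Nat) (p : Array Int) (x : Int) (h : pvAGet p x = x) :
    pvFindB f p x = x := by
  cases f with
  | zero => rfl
  | succ g => simp [pvFindB, h]

theorem pvFindA_nonneg_nat : ∀ (n : Nat) (p : Array Int) (f : Nat), pvGood p → n < p.size →
    n < f → ((pvFindA f p (n : Int)).2 = (pvRoot p n : Int) ∧ pvP p (pvFindA f p (n : Int)).1) := by
  intro n
  induction n using Nat.strong_induction_on with
  | _ n ih =>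
    intro p f hG hn hf
    obtain ⟨g, rfl⟩ : ∃ g, f = g + 1 := ⟨f - 1, by omega⟩
    have hget : pvAGet p (n : Int) = p.getD n 0 := by
      rw [pvAGet_natCast]
    by_cases h : p.getD n 0 = (n : Int)
    · rw [pvFindA_fix _ p _ (by rw [hget, h])]
      refine ⟨by simp [pvRoot_fix_of p n h], rfl, hG, fun y _ => rfl⟩
    · have hb := hG n hn
      have he0 : 0 ≤ p.getD n 0 := hb.1
      have heN : (p.getD n 0).toNat < n := by omega
      have hcast : p.getD n 0 = (((p.getD n 0).toNat : Nat) : Int) := by omega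
      have hih := ih (p.getD n 0).toNat heN p g hG (by omega) (by omega)
      rw [← hcast] at hih
      obtain ⟨hval, hlen1, hG1, hroots1⟩ := hih
      have hroot_eq : pvRoot p (p.getD n 0).toNat = pvRoot p n :=
        (pvRoot_nonroot p hG n hn h).symm
      have hcond : pvAGet p (n : Int) ≠ (n : Int) := by rw [hget]; exact h
      have hstep : pvFindA (g+1) p (n : Int) =
          (pvASet (pvFindA g p (pvAGet p (n : Int))).1 (n : Int)
              (pvFindA g p (pvAGet p (n : Int))).2,
            pvAGet (pvASet (pvFindA g p (pvAGet p (n : Int))).1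
              (n : Int) (pvFindA g p (pvAGet p (n : Int))).2) (n : Int)) := by
        simp only [pvFindA]
        rw [if_pos hcond]
      rw [hstep, hget]
      set p1 := (pvFindA g p (p.getD n 0)).1 with hp1
      have hr : (pvFindA g p (p.getD n 0)).2 = (pvRoot p n : Int) := by
        rw [hval, hroot_eq]
      rw [hr]
      have hn1 : n < p1.size := by rw [hlen1]; exact hn
      have hset : pvASet p1 (n : Int) (pvRoot p n : Int)
          = p1.setIfInBounds n (pvRoot p n : Int) := by
        rw [pvASet_natCast]
      rw [hset]
      have hroot1n : pvRoot p1 n = pvRoot p n := hroots1 n hn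
      have hle : pvRoot p1 n ≤ n := pvRoot_le p1 hG1 n hn1
      have hG2 : pvGood (p1.setIfInBounds n (pvRoot p n : Int)) := by
        rw [← hroot1n]
        exact pvGood_set p1 hG1 n _ hn1 (by positivity) (by exact_mod_cast hle)
      have hroots2 : ∀ y, y < p1.size → pvRoot (p1.setIfInBounds n (pvRoot p n : Int)) y = pvRoot p1 y := by
        rw [← hroot1n]
        exact pvRoot_set_root p1 hG1 n hn1
      constructor
      · show pvAGet (p1.setIfInBounds n (pvRoot p n : Int)) (n : Int) = (pvRoot p n : Int)
        rw [pvAGet_natCast, pvGetD_set p1 n n _ hn1, if_pos rfl]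
      · refine ⟨by simp [hlen1], hG2, fun y hy => ?_⟩
        rw [hroots2 y (by omega), hroots1 y hy]

theorem pvFindB_nonneg_nat : ∀ (n : Nat) (p : Array Int) (f : Nat), pvGood p → n < p.size →
    n < f → pvFindB f p (n : Int) = (pvRoot p n : Int) := by
  intro n
  induction n using Nat.strong_induction_on with
  | _ n ih =>
    intro p f hG hn hf
    obtain ⟨g, rfl⟩ : ∃ g, f = g + 1 := ⟨f - 1, by omega⟩
    have hget : pvAGet p (n : Int) = p.getD n 0 := by
      rw [pvAGet_natCast]
    by_cases h : p.getD n 0 = (n : Int)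
    · rw [pvFindB_fix _ p _ (by rw [hget, h]), pvRoot_fix_of p n h]
    · have hb := hG n hn
      have heN : (p.getD n 0).toNat < n := by omega
      have hcast : p.getD n 0 = (((p.getD n 0).toNat : Nat) : Int) := by omega
      have hcond : pvAGet p (n : Int) ≠ (n : Int) := by rw [hget]; exact h
      have hstep : pvFindB (g+1) p (n : Int) = pvFindB g p (pvAGet p (n : Int)) := by
        simp only [pvFindB]
        rw [if_pos hcond]
      rw [hstep, hget, hcast, ih (p.getD n 0).toNat heN p g hG (by omega) (by omega),
        pvRoot_nonroot p hG n hn h]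

theorem pvFindA_spec (p : Array Int) (hG : pvGood p) (x : Int) (f : Nat)
    (hlo : -(p.size : Int) ≤ x) (hhi : x < (p.size : Int)) (hf : p.size ≤ f) :
    (pvFindA f p x).2 = (pvRoot p (pvNorm p.size x) : Int) ∧ pvP p (pvFindA f p x).1 := by
  by_cases hx0 : 0 ≤ x
  · have hxc : x = ((x.toNat : Nat) : Int) := by omega
    rw [hxc]
    simp only [pvNorm, Int.toNat_natCast]
    have : x.toNat < p.size := by omega
    exact pvFindA_nonneg_nat x.toNat p f hG this (by omega)
  · have hneg : x < 0 := by omega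
    have hL1 : 1 ≤ p.size := by omega
    set nx := (x + p.size).toNat with hnx
    have hnorm : pvNorm p.size x = nx := by simp only [pvNorm, hx0, if_false]; omega
    have hnxlt : nx < p.size := by omega
    obtain ⟨g, rfl⟩ : ∃ g, f = g + 1 := ⟨f - 1, by omega⟩
    have hget : pvAGet p x = p.getD nx 0 := pvAGet_neg p x hneg
    have hb := hG nx hnxlt
    have hcond : pvAGet p x ≠ x := by rw [hget]; omega
    have hstep : pvFindA (g+1) p x =
        (pvASet (pvFindA g p (pvAGet p x)).1 x
            (pvFindA g p (pvAGet p x)).2,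
          pvAGet (pvASet (pvFindA g p (pvAGet p x)).1 x
            (pvFindA g p (pvAGet p x)).2) x) := by
      simp only [pvFindA]
      rw [if_pos hcond]
    rw [hstep, hnorm, hget]
    by_cases hfix : p.getD nx 0 = (nx : Int)
    · rw [hfix]
      rw [pvFindA_fix g p (nx : Int) (by rw [pvAGet_natCast]; exact hfix)]
      have hsetd : pvASet p x ((nx : Nat) : Int) = p.setIfInBounds nx (nx : Int) :=
        pvASet_neg p x _ hneg
      rw [hsetd]
      have hlen2 : (p.setIfInBounds nx (nx : Int)).size = p.size := Array.size_setIfInBounds ..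
      have hent : ∀ i, (p.setIfInBounds nx (nx : Int)).getD i 0 = p.getD i 0 := by
        intro i
        rw [pvGetD_set p nx i _ hnxlt]
        by_cases hi : i = nx
        · subst hi; rw [if_pos rfl]; exact hfix.symm
        · rw [if_neg hi]
      refine ⟨?_, hlen2, ?_, fun y _ => pvRoot_congr _ p (by rw [hlen2]) hent y⟩
      · show pvAGet (p.setIfInBounds nx (nx : Int)) x = ((pvRoot p nx : Nat) : Int)
        rw [pvAGet_neg _ x hneg]
        have h2 : (x + ((p.setIfInBounds nx (nx : Int)).size : Int)).toNat = nx := by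
          rw [hlen2]
        rw [h2, hent nx, hfix, pvRoot_fix_of p nx hfix]
      · intro i hi
        rw [hlen2] at hi
        rw [hent i]
        exact hG i hi
    · have he0 : 0 ≤ p.getD nx 0 := hb.1
      have heN : (p.getD nx 0).toNat < nx := by omega
      have hcast : p.getD nx 0 = (((p.getD nx 0).toNat : Nat) : Int) := by omega
      have hfa := pvFindA_nonneg_nat (p.getD nx 0).toNat p g hG (by omega) (by omega)
      rw [← hcast] at hfa
      obtain ⟨hval, hlen1, hG1, hroots1⟩ := hfa
      have hroot_eq : pvRoot p (p.getD nx 0).toNat = pvRoot p nx :=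
        (pvRoot_nonroot p hG nx hnxlt hfix).symm
      set p1 := (pvFindA g p (p.getD nx 0)).1 with hp1
      have hr : (pvFindA g p (p.getD nx 0)).2 = (pvRoot p nx : Int) := by rw [hval, hroot_eq]
      rw [hr]
      have hn1 : nx < p1.size := by rw [hlen1]; exact hnxlt
      have hsetd : pvASet p1 x (pvRoot p nx : Int) = p1.setIfInBounds nx (pvRoot p nx : Int) := by
        rw [pvASet_neg p1 x _ hneg, hlen1]
      rw [hsetd]
      have hroot1n : pvRoot p1 nx = pvRoot p nx := hroots1 nx hnxlt
      have hle : pvRoot p1 nx ≤ nx := pvRoot_le p1 hG1 nx hn1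
      have hG2 : pvGood (p1.setIfInBounds nx (pvRoot p nx : Int)) := by
        rw [← hroot1n]
        exact pvGood_set p1 hG1 nx _ hn1 (by positivity) (by exact_mod_cast hle)
      have hroots2 : ∀ y, y < p1.size →
          pvRoot (p1.setIfInBounds nx (pvRoot p nx : Int)) y = pvRoot p1 y := by
        rw [← hroot1n]
        exact pvRoot_set_root p1 hG1 nx hn1
      have hlen2 : (p1.setIfInBounds nx (pvRoot p nx : Int)).size = p.size := by
        rw [Array.size_setIfInBounds, hlen1]
      refine ⟨?_, hlen2, hG2, fun y hy => ?_⟩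
      · show pvAGet (p1.setIfInBounds nx (pvRoot p nx : Int)) x = ((pvRoot p nx : Nat) : Int)
        rw [pvAGet_neg _ x hneg]
        have h2 : (x + ((p1.setIfInBounds nx (pvRoot p nx : Int)).size : Int)).toNat = nx := by
          rw [hlen2]
        rw [h2, pvGetD_set p1 nx nx _ hn1, if_pos rfl]
      · rw [hroots2 y (by omega), hroots1 y hy]

theorem pvFindB_spec (p : Array Int) (hG : pvGood p) (x : Int) (f : Nat)
    (hlo : -(p.size : Int) ≤ x) (hhi : x < (p.size : Int)) (hf : p.size ≤ f) :
    pvFindB f p x = (pvRoot p (pvNorm p.size x) : Int) := by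
  by_cases hx0 : 0 ≤ x
  · have hxc : x = ((x.toNat : Nat) : Int) := by omega
    rw [hxc]
    simp only [pvNorm, Int.toNat_natCast]
    exact pvFindB_nonneg_nat x.toNat p f hG (by omega) (by omega)
  · have hneg : x < 0 := by omega
    set nx := (x + p.size).toNat with hnx
    have hnorm : pvNorm p.size x = nx := by simp only [pvNorm, hx0, if_false]; omega
    have hnxlt : nx < p.size := by omega
    obtain ⟨g, rfl⟩ : ∃ g, f = g + 1 := ⟨f - 1, by omega⟩
    have hget : pvAGet p x = p.getD nx 0 := pvAGet_neg p x hneg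
    have hb := hG nx hnxlt
    have hcond : pvAGet p x ≠ x := by rw [hget]; omega
    have hstep : pvFindB (g+1) p x = pvFindB g p (pvAGet p x) := by
      simp only [pvFindB]
      rw [if_pos hcond]
    rw [hstep, hnorm, hget]
    by_cases hfix : p.getD nx 0 = (nx : Int)
    · rw [hfix, pvFindB_fix g p (nx : Int) (by rw [pvAGet_natCast]; exact hfix),
        pvRoot_fix_of p nx hfix]
    · have heN : (p.getD nx 0).toNat < nx := by omega
      have hcast : p.getD nx 0 = (((p.getD nx 0).toNat : Nat) : Int) := by omega
      rw [hcast, pvFindB_nonneg_nat (p.getD nx 0).toNat p g hG (by omega) (by omega),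
        pvRoot_nonroot p hG nx hnxlt hfix]

def pvSum (N : Int) (p : Array Int) : Int :=
  ((PySem.List.pyRange 1 (N+1) 1).map
      (fun i => if pvAGet p i = i then (1:Int) else 0)).foldl (· + ·) 0

theorem pvSum_sum (N : Int) (p : Array Int) : pvSum N p =
    ((PySem.List.pyRange 1 (N+1) 1).map
      (fun i => if pvAGet p i = i then (1:Int) else 0)).sum := by
  unfold pvSum
  rw [List.sum_eq_foldl]

theorem pvSum_congr (N : Int) (hN : 0 ≤ N) (p q : Array Int) (hG : pvGood p) (hG' : pvGood q)
    (hp : p.size = (N+1).toNat) (hq : q.size = (N+1).toNat)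
    (hroots : ∀ y, y < p.size → pvRoot p y = pvRoot q y) : pvSum N p = pvSum N q := by
  rw [pvSum_sum, pvSum_sum]
  congr 1
  apply List.map_congr_left
  intro i hi
  rw [PySem.List.mem_pyRange_one] at hi
  have h0 : 0 ≤ i := by omega
  have hic : i = ((i.toNat : Nat) : Int) := by omega
  have hilt : i.toNat < p.size := by omega
  rw [pvAGet_of_nonneg p _ h0, pvAGet_of_nonneg q _ h0]
  have hiff : (p.getD i.toNat 0 = i) ↔ (q.getD i.toNat 0 = i) := by
    rw [hic]
    simp only [Int.toNat_natCast]
    rw [pvEntry_iff_root p hG i.toNat hilt, pvEntry_iff_root q hG' i.toNat (by omega),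
      hroots i.toNat hilt]
  by_cases h : p.getD i.toNat 0 = i
  · rw [if_pos h, if_pos (hiff.mp h)]
  · rw [if_neg h, if_neg (fun hc => h (hiff.mpr hc))]

theorem pvSum_set (N : Int) (hN : 0 ≤ N) (p : Array Int) (hp : p.size = (N+1).toNat)
    (a b : Nat) (hb : b < p.size) (hab : a < b) (hrb : p.getD b 0 = (b : Int)) :
    pvSum N (p.setIfInBounds b (a : Int)) = pvSum N p - 1 := by
  rw [pvSum_sum, pvSum_sum]
  have hb1 : (1:Int) ≤ (b:Int) := by omega
  have hbN : (b:Int) < N + 1 := by omega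
  rw [PySem.List.pyRange_one_append 1 (b:Int) (N+1) hb1 (by omega),
    PySem.List.pyRange_one_cons hbN]
  simp only [List.map_append, List.map_cons, List.sum_append, List.sum_cons]
  have hsame : ∀ i : Int, 1 ≤ i → i < N + 1 → i ≠ (b:Int) →
      pvAGet (p.setIfInBounds b (a : Int)) i = pvAGet p i := by
    intro i h1 h2 hne
    have h0 : (0:Int) ≤ i := by omega
    rw [pvAGet_of_nonneg _ _ h0, pvAGet_of_nonneg p _ h0,
      pvGetD_set p b i.toNat _ hb, if_neg (by omega)]
  have hseg1 : (PySem.List.pyRange 1 (b:Int) 1).map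
        (fun i => if pvAGet (p.setIfInBounds b (a : Int)) i = i then (1:Int) else 0)
      = (PySem.List.pyRange 1 (b:Int) 1).map
        (fun i => if pvAGet p i = i then (1:Int) else 0) := by
    apply List.map_congr_left
    intro i hi
    rw [PySem.List.mem_pyRange_one] at hi
    rw [hsame i hi.1 (by omega) (by omega)]
  have hseg2 : (PySem.List.pyRange ((b:Int)+1) (N+1) 1).map
        (fun i => if pvAGet (p.setIfInBounds b (a : Int)) i = i then (1:Int) else 0)
      = (PySem.List.pyRange ((b:Int)+1) (N+1) 1).map
        (fun i => if pvAGet p i = i then (1:Int) else 0) := by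
    apply List.map_congr_left
    intro i hi
    rw [PySem.List.mem_pyRange_one] at hi
    rw [hsame i (by omega) hi.2 (by omega)]
  rw [hseg1, hseg2]
  have hterm : pvAGet (p.setIfInBounds b (a : Int)) (b:Int) = (a : Int) := by
    rw [pvAGet_of_nonneg _ _ (by omega)]
    simp only [Int.toNat_natCast]
    rw [pvGetD_set p b b _ hb, if_pos rfl]
  have htermp : pvAGet p (b:Int) = (b : Int) := by
    rw [pvAGet_of_nonneg p _ (by omega)]
    simp only [Int.toNat_natCast]
    exact hrb
  rw [hterm, htermp, if_neg (by omega : ((a:Nat):Int) ≠ (b:Int)), if_pos rfl]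
  ring

theorem pvInit_getD (N : Int) (i : Nat) (hi : (i:Int) < N + 1) :
    (PySem.List.pyRange 0 (N+1) 1).toArray.getD i 0 = (i : Int) := by
  rw [pvGetD_toArray, List.getD_eq_getElem?_getD, List.getElem?_eq_getElem
    (by rw [PySem.List.length_pyRange_one]; omega), Option.getD_some,
    PySem.List.getElem_pyRange_one]
  omega

theorem pvSum_init (N : Int) (hN : 0 ≤ N) :
    pvSum N (PySem.List.pyRange 0 (N+1) 1).toArray = N := by
  rw [pvSum_sum]
  have hmap : (PySem.List.pyRange 1 (N+1) 1).map
        (fun i => if pvAGet (PySem.List.pyRange 0 (N+1) 1).toArray i = i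
          then (1:Int) else 0)
      = (PySem.List.pyRange 1 (N+1) 1).map (fun _ => (1:Int)) := by
    apply List.map_congr_left
    intro i hi
    rw [PySem.List.mem_pyRange_one] at hi
    have hget : pvAGet (PySem.List.pyRange 0 (N+1) 1).toArray i = i := by
      rw [pvAGet_of_nonneg _ i (by omega), pvInit_getD N i.toNat (by omega)]
      omega
    rw [hget, if_pos rfl]
  rw [hmap]
  rw [List.map_const', List.sum_replicate, PySem.List.length_pyRange_one]
  simp
  omega

def pvInv (N : Int) (st : Array Int × Int) (q : Array Int) (k : Nat) : Prop :=
  st.1.size = (N+1).toNat ∧ q.size = (N+1).toNat ∧ pvGood st.1 ∧ pvGood q ∧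
  (∀ y, y < (N+1).toNat → pvRoot st.1 y = pvRoot q y) ∧
  st.2 = (k : Int) - N + pvSum N q

theorem pvNorm_lt (L : Nat) (x : Int) (h1 : -(L:Int) ≤ x) (h2 : x < (L:Int)) :
    pvNorm L x < L := by
  unfold pvNorm
  split <;> omega

theorem pvStep (N : Int) (hN : 0 ≤ N) (u v : Int)
    (hu1 : -(N+1) ≤ u) (hu2 : u ≤ N) (hv1 : -(N+1) ≤ v) (hv2 : v ≤ N)
    (st : Array Int × Int) (q : Array Int) (k : Nat) (hI : pvInv N st q k) :
    pvInv N
      (pvUnionA (N+1).toNat (pvFindA (N+1).toNat (pvFindA (N+1).toNat st.1 u).1 v).1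
          (pvFindA (N+1).toNat st.1 u).2 (pvFindA (N+1).toNat (pvFindA (N+1).toNat st.1 u).1 v).2,
        if (pvFindA (N+1).toNat st.1 u).2 = (pvFindA (N+1).toNat (pvFindA (N+1).toNat st.1 u).1 v).2
          then st.2 + 1 else st.2)
      (if pvFindB q.size q u ≠ pvFindB q.size q v
        then pvASet q (max (pvFindB q.size q u) (pvFindB q.size q v))
          (min (pvFindB q.size q u) (pvFindB q.size q v))
        else q)
      (k+1) := by
  obtain ⟨hlp, hlq, hGp, hGq, hroots, hans⟩ := hI
  set L := (N+1).toNat with hL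
  have hLint : ((L:Nat) : Int) = N + 1 := by omega
  have hup : -((st.1.size : Nat) : Int) ≤ u ∧ u < ((st.1.size : Nat) : Int) := by
    rw [hlp, hLint]; omega
  -- first find on A side
  have h1 := pvFindA_spec st.1 hGp u L hup.1 hup.2 (le_of_eq hlp)
  obtain ⟨hval1, hlen1, hG1, hroots1⟩ := h1
  set p1 := (pvFindA L st.1 u).1 with hp1
  set nu := pvNorm st.1.size u with hnu
  have hnuL : nu < L := by rw [hnu, ← hlp]; exact pvNorm_lt _ u hup.1 hup.2
  -- second find on A side
  have hvp : -((p1.size : Nat) : Int) ≤ v ∧ v < ((p1.size : Nat) : Int) := by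
    rw [hlen1, hlp, hLint]; omega
  have h2 := pvFindA_spec p1 hG1 v L hvp.1 hvp.2 (le_of_eq (hlen1.trans hlp))
  obtain ⟨hval2, hlen2, hG2, hroots2⟩ := h2
  set p2 := (pvFindA L p1 v).1 with hp2
  set nv := pvNorm p1.size v with hnv
  have hnveq : nv = pvNorm st.1.size v := by rw [hnv, hlen1]
  have hnvL : nv < L := by
    rw [hnveq, ← hlp]
    exact pvNorm_lt _ v (by rw [hlp, hLint]; omega) (by rw [hlp, hLint]; omega)
  have hlen2' : p2.size = L := by rw [hlen2, hlen1, hlp]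
  have hlen1' : p1.size = L := by rw [hlen1, hlp]
  set ruA := pvRoot st.1 nu with hruA
  set rvA := pvRoot st.1 nv with hrvA
  have hruL : ruA < L := by
    have := pvRoot_le st.1 hGp nu (by omega)
    omega
  have hrvL : rvA < L := by
    have := pvRoot_le st.1 hGp nv (by omega)
    omega
  have hval1' : (pvFindA L st.1 u).2 = (ruA : Int) := hval1
  have hval2' : (pvFindA L p1 v).2 = (rvA : Int) := by
    rw [hval2]
    norm_cast
    rw [hrvA]
    exact hroots1 nv (by omega)
  have hroots12 : ∀ y, y < L → pvRoot p2 y = pvRoot st.1 y := by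
    intro y hy
    rw [hroots2 y (by omega), hroots1 y (by omega)]
  -- B side finds
  have hqb : -((q.size : Nat) : Int) ≤ u ∧ u < ((q.size : Nat) : Int) := by
    rw [hlq, hLint]; exact ⟨hu1, by omega⟩
  have hqbv : -((q.size : Nat) : Int) ≤ v ∧ v < ((q.size : Nat) : Int) := by
    rw [hlq, hLint]; exact ⟨hv1, by omega⟩
  have hBu : pvFindB q.size q u = (ruA : Int) := by
    rw [pvFindB_spec q hGq u q.size hqb.1 hqb.2 le_rfl]
    norm_cast
    have : pvNorm q.size u = nu := by rw [hnu, hlq, hlp]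
    rw [this, hruA]
    exact (hroots nu hnuL).symm
  have hBv : pvFindB q.size q v = (rvA : Int) := by
    rw [pvFindB_spec q hGq v q.size hqbv.1 hqbv.2 le_rfl]
    norm_cast
    have : pvNorm q.size v = pvNorm st.1.size v := by rw [hlq, hlp]
    rw [this, ← hnveq, hrvA]
    exact (hroots nv hnvL).symm
  -- roots are fixed entries of p2
  have hfixu : p2.getD ruA 0 = (ruA : Int) := by
    have h := pvRoot_isfix p2 hG2 nu (by omega)
    rwa [hroots12 nu hnuL, ← hruA] at h
  have hfixv : p2.getD rvA 0 = (rvA : Int) := by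
    have h := pvRoot_isfix p2 hG2 nv (by omega)
    rwa [hroots12 nv hnvL, ← hrvA] at h
  -- union computes a single set on p2
  have hunion : pvUnionA L p2 (ruA : Int) (rvA : Int)
      = p2.setIfInBounds (max ruA rvA) ((min ruA rvA : Nat) : Int) := by
    unfold pvUnionA
    simp only [pvFindA_fix L p2 (ruA : Int) (by rw [pvAGet_natCast]; exact hfixu)]
    simp only [pvFindA_fix L p2 (rvA : Int) (by rw [pvAGet_natCast]; exact hfixv)]
    rw [← Nat.cast_max, ← Nat.cast_min]
    rw [pvASet_natCast]
  rw [hval1', hval2', hunion, hBu, hBv]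
  have hInv : ∀ (p : Array Int) (a : Int) (q' : Array Int),
      p.size = (N+1).toNat → q'.size = (N+1).toNat → pvGood p → pvGood q' →
      (∀ y, y < (N+1).toNat → pvRoot p y = pvRoot q' y) →
      a = ((k+1 : Nat) : Int) - N + pvSum N q' → pvInv N (p, a) q' (k+1) :=
    fun p a q' h1 h2 h3 h4 h5 h6 => ⟨h1, h2, h3, h4, h5, h6⟩
  by_cases heq : ruA = rvA
  · have hceq : ((ruA : Nat) : Int) = ((rvA : Nat) : Int) := by exact_mod_cast heq
    have hmax : max ruA rvA = ruA := by omega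
    have hmin : min ruA rvA = ruA := by omega
    rw [hmax, hmin, if_pos hceq, if_neg (by simp [hceq] : ¬ ((ruA:Nat):Int) ≠ ((rvA:Nat):Int))]
    have hent : ∀ i, (p2.setIfInBounds ruA ((ruA : Nat) : Int)).getD i 0 = p2.getD i 0 := by
      intro i
      rw [pvGetD_set p2 ruA i _ (by omega)]
      by_cases hi : i = ruA
      · subst hi; rw [if_pos rfl]; exact hfixu.symm
      · rw [if_neg hi]
    have hlen3 : (p2.setIfInBounds ruA ((ruA : Nat) : Int)).size = (N+1).toNat := by
      rw [Array.size_setIfInBounds]; exact hlen2'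
    apply hInv
    · exact hlen3
    · exact hlq
    · intro i hi
      rw [hent i]
      refine hG2 i ?_
      rw [hlen3] at hi
      omega
    · exact hGq
    · intro y hy
      rw [pvRoot_congr _ p2 (by rw [hlen3, hlen2']) hent y, hroots12 y hy, hroots y hy]
    · push_cast
      omega
  · have hcond : ¬ ((ruA : Nat) : Int) = ((rvA : Nat) : Int) := by exact_mod_cast heq
    rw [if_neg hcond, if_pos hcond]
    set a' := min ruA rvA with ha'
    set b' := max ruA rvA with hb'
    have hab : a' < b' := by omega
    have hbL : b' < L := by omega
    have hfixa : p2.getD a' 0 = (a' : Int) := by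
      rcases min_choice ruA rvA with h | h <;> rw [← ha'] at h <;> rw [h]
      · exact hfixu
      · exact hfixv
    have hfixb : p2.getD b' 0 = (b' : Int) := by
      rcases max_choice ruA rvA with h | h <;> rw [← hb'] at h <;> rw [h]
      · exact hfixu
      · exact hfixv
    have hqa : q.getD a' 0 = (a' : Int) := by
      have h1 : pvRoot q nu = ruA := (hroots nu hnuL).symm
      have h2 : pvRoot q nv = rvA := (hroots nv hnvL).symm
      rcases min_choice ruA rvA with h | h <;> rw [← ha'] at h <;> rw [h]
      · have := pvRoot_isfix q hGq nu (by omega); rwa [h1] at this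
      · have := pvRoot_isfix q hGq nv (by omega); rwa [h2] at this
    have hqb' : q.getD b' 0 = (b' : Int) := by
      have h1 : pvRoot q nu = ruA := (hroots nu hnuL).symm
      have h2 : pvRoot q nv = rvA := (hroots nv hnvL).symm
      rcases max_choice ruA rvA with h | h <;> rw [← hb'] at h <;> rw [h]
      · have := pvRoot_isfix q hGq nu (by omega); rwa [h1] at this
      · have := pvRoot_isfix q hGq nv (by omega); rwa [h2] at this
    have hsetq : pvASet q (max ((ruA:Nat):Int) ((rvA:Nat):Int))
        (min ((ruA:Nat):Int) ((rvA:Nat):Int)) = q.setIfInBounds b' ((a' : Nat) : Int) := by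
      rw [← Nat.cast_max, ← Nat.cast_min, pvASet_natCast]
    rw [hsetq]
    have hroots3 := pvRoot_set_link p2 hG2 a' b' (by omega) (by omega) (le_of_lt hab) hfixa hfixb
    have hrootsq := pvRoot_set_link q hGq a' b' (by omega) (by omega) (le_of_lt hab) hqa hqb'
    have hlen3 : (p2.setIfInBounds b' ((a' : Nat) : Int)).size = (N+1).toNat := by
      rw [Array.size_setIfInBounds]; exact hlen2'
    have hlenq3 : (q.setIfInBounds b' ((a' : Nat) : Int)).size = (N+1).toNat := by
      rw [Array.size_setIfInBounds]; exact hlq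
    apply hInv
    · exact hlen3
    · exact hlenq3
    · exact pvGood_set p2 hG2 b' _ (by omega) (by positivity)
        (by exact_mod_cast le_of_lt hab)
    · exact pvGood_set q hGq b' _ (by omega) (by positivity)
        (by exact_mod_cast le_of_lt hab)
    · intro y hy
      rw [hroots3 y (by omega), hrootsq y (by omega), hroots12 y hy, hroots y hy]
    · rw [pvSum_set N hN q hlq a' b' (by omega) hab hqb']
      push_cast
      omega

def pvStepA (L : Nat) (st : Array Int × Int) (uv : Int × Int) : Array Int × Int :=
  (pvUnionA L (pvFindA L (pvFindA L st.1 uv.1).1 uv.2).1 (pvFindA L st.1 uv.1).2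
      (pvFindA L (pvFindA L st.1 uv.1).1 uv.2).2,
    if (pvFindA L st.1 uv.1).2 = (pvFindA L (pvFindA L st.1 uv.1).1 uv.2).2
      then st.2 + 1 else st.2)

def pvStepB (q : Array Int) (uv : Int × Int) : Array Int :=
  if pvFindB q.size q uv.1 ≠ pvFindB q.size q uv.2
  then pvASet q (max (pvFindB q.size q uv.1) (pvFindB q.size q uv.2))
      (min (pvFindB q.size q uv.1) (pvFindB q.size q uv.2))
  else q

theorem pvStep' (N : Int) (hN : 0 ≤ N) (uv : Int × Int)
    (h1 : -(N+1) ≤ uv.1) (h2 : uv.1 ≤ N) (h3 : -(N+1) ≤ uv.2) (h4 : uv.2 ≤ N)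
    (st : Array Int × Int) (q : Array Int) (k : Nat) (hI : pvInv N st q k) :
    pvInv N (pvStepA (N+1).toNat st uv) (pvStepB q uv) (k+1) := by
  unfold pvStepA pvStepB
  exact pvStep N hN uv.1 uv.2 h1 h2 h3 h4 st q k hI

theorem pvLoop (N : Int) (hN : 0 ≤ N) :
    ∀ (edges : List (Int × Int)) (st : Array Int × Int) (q : Array Int) (k : Nat),
      (∀ uv ∈ edges, -(N+1) ≤ uv.1 ∧ uv.1 ≤ N ∧ -(N+1) ≤ uv.2 ∧ uv.2 ≤ N) →
      pvInv N st q k →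
      pvInv N (edges.foldl (pvStepA (N+1).toNat) st) (edges.foldl pvStepB q)
        (k + edges.length) := by
  intro edges
  induction edges with
  | nil => intro st q k _ hI; simpa using hI
  | cons uv rest ih =>
    intro st q k hpre hI
    have hb := hpre uv List.mem_cons_self
    have hstep := pvStep' N hN uv hb.1 hb.2.1 hb.2.2.1 hb.2.2.2 st q k hI
    have hres := ih _ _ (k+1) (fun e he => hpre e (List.mem_cons_of_mem _ he)) hstep
    simp only [List.foldl_cons, List.length_cons]
    have harith : k + 1 + rest.length = k + (rest.length + 1) := by omega
    rw [← harith]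
    exact hres

theorem pvGood_init (N : Int) (_hN : 0 <= N) : pvGood (PySem.List.pyRange 0 (N+1) 1).toArray := by
  intro i hi
  rw [List.size_toArray, PySem.List.length_pyRange_one] at hi
  rw [pvInit_getD N i (by omega)]
  omega

theorem pvMain (N M : Int) (edges : List (Int × Int)) (hN : 0 ≤ N)
    (hb : ∀ uv ∈ edges, -(N+1) ≤ uv.1 ∧ uv.1 ≤ N ∧ -(N+1) ≤ uv.2 ∧ uv.2 ≤ N) :
    solution N M edges = solution_alt N M edges := by
  have hlen0 : (PySem.List.pyRange 0 (N+1) 1).toArray.size = (N+1).toNat := by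
    rw [List.size_toArray, PySem.List.length_pyRange_one]; simp
  have hA : solution N M edges =
      (edges.foldl (pvStepA (PySem.List.pyRange 0 (N+1) 1).toArray.size)
        ((PySem.List.pyRange 0 (N+1) 1).toArray, 0)).2 +
      pvSum N (edges.foldl (pvStepA (PySem.List.pyRange 0 (N+1) 1).toArray.size)
        ((PySem.List.pyRange 0 (N+1) 1).toArray, 0)).1 - 1 := rfl
  have hB : solution_alt N M edges = (edges.length : Int) - N +
      2 * pvSum N (edges.foldl pvStepB (PySem.List.pyRange 0 (N+1) 1).toArray) - 1 := rfl
  rw [hA, hB, hlen0]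
  have hinv0 : pvInv N ((PySem.List.pyRange 0 (N+1) 1).toArray, 0)
      (PySem.List.pyRange 0 (N+1) 1).toArray 0 :=
    ⟨hlen0, hlen0, pvGood_init N hN, pvGood_init N hN, fun y _ => rfl, by
      show (0:Int) = ((0:Nat):Int) - N + pvSum N (PySem.List.pyRange 0 (N+1) 1).toArray
      rw [pvSum_init N hN]; push_cast; ring⟩
  have h := pvLoop N hN edges _ _ 0 hb hinv0
  obtain ⟨hl1, hl2, hg1, hg2, hr, hans⟩ := h
  rw [pvSum_congr N hN _ _ hg1 hg2 hl1 hl2 (fun y hy => hr y (by rw [← hl1]; exact hy))]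
  rw [hans]
  push_cast
  ring

-- ===== VERDICT (by name: the statement is the Claim_ definition above) =====
theorem solution_spec : Claim_equal_solution := by
  intro N M edges _ hpre
  show solution N M edges = solution_alt N M edges
  exact pvMain N M edges hpre.1 hpre.2
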